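-- pv_equiv track=rewrite | github.com/cdhx/QDTQA | Clue-Decipher/src/utils/utils.py | get_2_part_decomposition
-- ===== SOURCE A (Python) =====
-- def get_2_part_decomposition(qdt):
--     if '[INQL]' in qdt and '[INQR]' in qdt:
--         result=' '.join([x for x in qdt.split() if x!='[DES]']).strip()
--     else:
--         qdt_token_list=qdt.split()
--         des_num=qdt.count('[DES]')
--         if des_num==1 or des_num==2:
--             des_flag = 1
--         elif des_num == 3 or des_num==4:
--             des_flag = 2
--         else:
--             des_flag=3
--         current_des=0
--         qdt_2_part=[]
--         for token in qdt_token_list: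
--             if token=='[DES]':
--                 current_des+=1
--                 if current_des==des_flag:
--                     qdt_2_part.append(token)
--             else:
--                 qdt_2_part.append(token)
--         result=' '.join(qdt_2_part)
--     return result
-- ===== SOURCE B (Python) =====
-- def get_2_part_decomposition(qdt):
--     # Segment representation: split the token stream into chunks separated by
--     # '[DES]' tokens, then reassemble, re-inserting the delimiter only at the
--     # chosen boundary.
--     chunks = [[]]
--     for t in qdt.split():
--         if t == '[DES]':
--             chunks.append([])
--         else:
--             chunks[-1].append(t)
--     if '[INQL]' in qdt and '[INQR]' in qdt:
--         return ' '.join(w for ch in chunks for w in ch).strip()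
--     des_flag = min((qdt.count('[DES]') + 1) // 2, 3) or 3
--     out = []
--     for b, ch in enumerate(chunks):
--         if b == des_flag:
--             out.append('[DES]')
--         out.extend(ch)
--     return ' '.join(out)
-- ===== Notes on version B (the rewrite author's own statement) =====
-- stated objective: alternative
-- what changed: B changes the data representation: it splits the token stream into segments separated by '[DES]' tokens, then reassembles the segments, re-inserting a single '[DES]' delimiter only at the chosen boundary (or flattening all segments in the [INQL]/[INQR] branch), instead of A's stateful single pass with a running occurrence counter deciding per token.
import Mathlib
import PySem

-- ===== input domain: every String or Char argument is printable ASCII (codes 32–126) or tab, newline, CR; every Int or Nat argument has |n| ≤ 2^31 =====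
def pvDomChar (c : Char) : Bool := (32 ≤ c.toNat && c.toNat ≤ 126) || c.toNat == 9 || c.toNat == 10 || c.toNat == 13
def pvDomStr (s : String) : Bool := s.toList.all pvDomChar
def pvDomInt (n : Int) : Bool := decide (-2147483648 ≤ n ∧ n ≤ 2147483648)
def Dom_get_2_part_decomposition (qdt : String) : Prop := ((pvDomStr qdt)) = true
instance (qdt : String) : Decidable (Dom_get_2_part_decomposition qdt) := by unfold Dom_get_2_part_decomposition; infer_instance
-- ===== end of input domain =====

-- B represents the token stream as segments separated by '[DES]' tokens and reassembles them,
-- re-inserting the delimiter only at the chosen boundary; objective: alternative, same cost.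

-- ===== PORT A =====
-- A's for-loop body over state (current_des, qdt_2_part)
def pvLoopStepA (desFlag : Nat) (st : Nat × List String) (token : String) : Nat × List String :=
  if token = "[DES]" then
    (st.1 + 1, if st.1 + 1 = desFlag then st.2 ++ [token] else st.2)
  else
    (st.1, st.2 ++ [token])

def get_2_part_decomposition (qdt : String) : String :=
  if PySem.Str.isIn "[INQL]" qdt && PySem.Str.isIn "[INQR]" qdt then
    PySem.Str.strip (PySem.Str.join " " ((PySem.Str.split₀ qdt).filter (fun x => x != "[DES]")))
  else
    let qdt_token_list := PySem.Str.split₀ qdt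
    let des_num := PySem.Str.count qdt "[DES]"
    let des_flag : Nat :=
      if des_num = 1 ∨ des_num = 2 then 1
      else if des_num = 3 ∨ des_num = 4 then 2
      else 3
    let qdt_2_part := (qdt_token_list.foldl (pvLoopStepA des_flag) (0, [])).2
    PySem.Str.join " " qdt_2_part

-- ===== PORT B =====
-- B's chunk-building loop body: `chunks.append([])` / `chunks[-1].append(t)`
-- over state (finished chunks, current chunk)
def pvChunkStep (st : List (List String) × List String) (t : String) : List (List String) × List String :=
  if t = "[DES]" then (st.1 ++ [st.2], []) else (st.1, st.2 ++ [t])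

-- B's reassembly loop body: `if b == des_flag: out.append('[DES]'); out.extend(ch)`
def pvAsmStep (desFlag : Int) (acc : List String) (p : Int × List String) : List String :=
  (if p.1 == desFlag then acc ++ ["[DES]"] else acc) ++ p.2

def get_2_part_decomposition_alt (qdt : String) : String :=
  let st := (PySem.Str.split₀ qdt).foldl pvChunkStep ([], [])
  let chunks := st.1 ++ [st.2]
  if PySem.Str.isIn "[INQL]" qdt && PySem.Str.isIn "[INQR]" qdt then
    PySem.Str.strip (PySem.Str.join " " chunks.flatten)
  else
    let f0 := min ((PySem.Str.count qdt "[DES]" + 1) / 2) 3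
    let des_flag : Nat := if f0 = 0 then 3 else f0   -- Python's `… or 3`
    let out := (PySem.List.enumerate chunks 0).foldl (pvAsmStep (des_flag : Int)) []
    PySem.Str.join " " out

-- ===== PRECONDITION & SPEC =====
def Spec_get_2_part_decomposition (qdt : String) (out : String) : Prop := out = get_2_part_decomposition_alt qdt
instance (qdt : String) (out : String) : Decidable (Spec_get_2_part_decomposition qdt out) := by unfold Spec_get_2_part_decomposition; infer_instance

-- ===== CLAIM (what is proved, stated in full; the proofs are below) =====
def Claim_equal_get_2_part_decomposition : Prop := ∀ (qdt : String), Dom_get_2_part_decomposition qdt → Spec_get_2_part_decomposition qdt (get_2_part_decomposition qdt)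

-- ===== LEMMAS AND PROOFS =====

-- recursive characterisation of B's chunk decomposition
def pvChunksRec : List String → List (List String)
  | [] => [[]]
  | t :: ts => if t = "[DES]" then [] :: pvChunksRec ts else (pvChunksRec ts).modifyHead (t :: ·)

theorem pvChunksRec_ne_nil (ts : List String) : pvChunksRec ts ≠ [] := by
  cases ts with
  | nil => simp [pvChunksRec]
  | cons t ts =>
    by_cases h : t = "[DES]" <;> simp [pvChunksRec, h]
    cases hr : pvChunksRec ts with
    | nil => exact absurd hr (pvChunksRec_ne_nil ts)
    | cons c cs => simp

theorem pvChunkFold_eq (ts : List String) :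
    ∀ (done : List (List String)) (cur : List String),
      (ts.foldl pvChunkStep (done, cur)).1 ++ [(ts.foldl pvChunkStep (done, cur)).2]
        = done ++ (pvChunksRec ts).modifyHead (cur ++ ·) := by
  induction ts with
  | nil => intro done cur; simp [pvChunksRec, List.modifyHead]
  | cons t ts ih =>
    intro done cur
    by_cases h : t = "[DES]"
    · rw [List.foldl_cons]
      have hstep : pvChunkStep (done, cur) t = (done ++ [cur], []) := by simp [pvChunkStep, h]
      rw [hstep, ih]
      cases hr : pvChunksRec ts with
      | nil => exact absurd hr (pvChunksRec_ne_nil ts)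
      | cons c cs => simp [pvChunksRec, h, hr, List.modifyHead]
    · rw [List.foldl_cons]
      have hstep : pvChunkStep (done, cur) t = (done, cur ++ [t]) := by simp [pvChunkStep, h]
      rw [hstep, ih]
      cases hr : pvChunksRec ts with
      | nil => exact absurd hr (pvChunksRec_ne_nil ts)
      | cons c cs => simp [pvChunksRec, h, hr, List.modifyHead]

theorem pvChunksRec_flatten (ts : List String) :
    (pvChunksRec ts).flatten = ts.filter (fun x => x != "[DES]") := by
  induction ts with
  | nil => simp [pvChunksRec]
  | cons t ts ih =>
    by_cases h : t = "[DES]"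
    · simp [pvChunksRec, h, ih]
    · cases hr : pvChunksRec ts with
      | nil => exact absurd hr (pvChunksRec_ne_nil ts)
      | cons c cs =>
        rw [hr] at ih
        simp [pvChunksRec, h, hr, List.modifyHead]
        simp_all

-- reassembly with countdown: insert '[DES]' before the chunk where the countdown hits 0
def pvAsm2 : List (List String) → Int → List String
  | [], _ => []
  | ch :: rest, k => (if k = 0 then ["[DES]"] else []) ++ ch ++ pvAsm2 rest (k - 1)

theorem pvAsmFold_eq (K : Int) (chs : List (List String)) :
    ∀ (s : Int) (acc : List String),
      (PySem.List.enumerate chs s).foldl (pvAsmStep K) acc = acc ++ pvAsm2 chs (K - s) := by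
  induction chs with
  | nil => intro s acc; simp [PySem.List.enumerate_nil, pvAsm2]
  | cons ch rest ih =>
    intro s acc
    rw [PySem.List.enumerate_cons, List.foldl_cons, ih]
    by_cases h : s = K
    · have h1 : K - (s + 1) = K - s - 1 := by omega
      have h0 : K - s = 0 := by omega
      rw [h1, h0]
      simp [pvAsmStep, h, pvAsm2]
    · have h0 : ¬ (K - s = 0) := by omega
      have h1 : K - (s + 1) = K - s - 1 := by omega
      simp [pvAsmStep, h, h1, h0, pvAsm2]

-- head variant: A's loop never inserts before the first chunk
def pvHead : List (List String) → Int → List String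
  | [], _ => []
  | ch :: rest, k => ch ++ pvAsm2 rest (k - 1)

theorem pvLoopA_eq (f : Nat) (ts : List String) :
    ∀ (c : Nat) (acc : List String),
      (ts.foldl (pvLoopStepA f) (c, acc)).2 = acc ++ pvHead (pvChunksRec ts) ((f : Int) - c) := by
  induction ts with
  | nil => intro c acc; simp [pvChunksRec, pvHead, pvAsm2]
  | cons t ts ih =>
    intro c acc
    by_cases h : t = "[DES]"
    · rw [List.foldl_cons]
      have hstep : pvLoopStepA f (c, acc) t
          = (c + 1, acc ++ (if c + 1 = f then ["[DES]"] else [])) := by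
        by_cases hcf : c + 1 = f <;> simp [pvLoopStepA, h, hcf]
      rw [hstep, ih]
      cases hr : pvChunksRec ts with
      | nil => exact absurd hr (pvChunksRec_ne_nil ts)
      | cons d ds =>
        have hk : (f : Int) - c - 1 = (f : Int) - (c + 1) := by omega
        by_cases hcf : c + 1 = f
        · have h0 : (f : Int) - ((c : Int) + 1) = 0 := by omega
          simp [pvChunksRec, h, hr, pvHead, pvAsm2, hcf, hk, h0]
        · have h0 : ¬ ((f : Int) - ((c : Int) + 1) = 0) := by omega
          simp [pvChunksRec, h, hr, pvHead, pvAsm2, hcf, hk, h0]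
    · rw [List.foldl_cons]
      have hstep : pvLoopStepA f (c, acc) t = (c, acc ++ [t]) := by simp [pvLoopStepA, h]
      rw [hstep, ih]
      cases hr : pvChunksRec ts with
      | nil => exact absurd hr (pvChunksRec_ne_nil ts)
      | cons d ds => simp [pvChunksRec, h, hr, List.modifyHead, pvHead]

theorem pvFlag_eq (c : Nat) :
    (if c = 1 ∨ c = 2 then 1 else if c = 3 ∨ c = 4 then 2 else 3)
      = (if min ((c + 1) / 2) 3 = 0 then 3 else min ((c + 1) / 2) 3) := by
  split_ifs <;> omega

theorem pvModifyHead_id (chs : List (List String)) :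
    chs.modifyHead (fun x => [] ++ x) = chs := by
  cases chs <;> simp [List.modifyHead]

-- ===== VERDICT (by name: the statement is the Claim_ definition above) =====
theorem get_2_part_decomposition_spec : Claim_equal_get_2_part_decomposition := by
  intro qdt _
  unfold Spec_get_2_part_decomposition get_2_part_decomposition get_2_part_decomposition_alt
  have hchunks : ((PySem.Str.split₀ qdt).foldl pvChunkStep ([], [])).1
      ++ [((PySem.Str.split₀ qdt).foldl pvChunkStep ([], [])).2]
      = pvChunksRec (PySem.Str.split₀ qdt) := by
    rw [pvChunkFold_eq, List.nil_append, pvModifyHead_id]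
  by_cases h : (PySem.Str.isIn "[INQL]" qdt && PySem.Str.isIn "[INQR]" qdt) = true
  · simp only [h, if_pos]
    rw [hchunks, pvChunksRec_flatten]
  · simp only [h, if_neg, Bool.not_eq_true]
    set c := PySem.Str.count qdt "[DES]" with hc
    set ts := PySem.Str.split₀ qdt with hts
    set fA : Nat := if c = 1 ∨ c = 2 then 1 else if c = 3 ∨ c = 4 then 2 else 3 with hfA
    set fB : Nat := if min ((c + 1) / 2) 3 = 0 then 3 else min ((c + 1) / 2) 3 with hfB
    have hflag : fA = fB := pvFlag_eq c
    have hf1 : 1 ≤ fA := by rw [hfA]; split_ifs <;> omega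
    rw [pvLoopA_eq fA ts 0 [], hchunks, pvAsmFold_eq]
    rw [← hflag]
    cases hr : pvChunksRec ts with
    | nil => exact absurd hr (pvChunksRec_ne_nil ts)
    | cons d ds =>
      have h0 : ¬ (fA = 0) := by omega
      simp [pvHead, pvAsm2, h0]
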